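-- pv_equiv track=rewrite | github.com/mucsci-students/2023sp-420-PyGame | MVC/Model/model_hints_module.py | getTwoLetterDictionary
-- ===== SOURCE A (Python) =====
-- def getTwoLetterDictionary(words):
--     twoLetterDictionary = {}
--     for word in words:
--         twoLetters = word[0:2]
--         if twoLetters not in twoLetterDictionary:
--             twoLetterDictionary[twoLetters] = 0
--         twoLetterDictionary[twoLetters] += 1
--     twoLetterDictionary = sorted(twoLetterDictionary)
--
--     return twoLetterDictionary
-- ===== SOURCE B (Python) =====
-- def getTwoLetterDictionary(words):
--     prefixes = sorted(word[0:2] for word in words)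
--     result = []
--     for p in prefixes:
--         if not result or result[-1] != p:
--             result.append(p)
--     return result
-- ===== Notes on version B (the rewrite author's own statement) =====
-- stated objective: alternative
-- what changed: Replaces A's hash-dict dedup-then-sort of unique prefixes with sorting the full prefix list (duplicates kept) and removing adjacent duplicates in one linear pass.
import Mathlib
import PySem

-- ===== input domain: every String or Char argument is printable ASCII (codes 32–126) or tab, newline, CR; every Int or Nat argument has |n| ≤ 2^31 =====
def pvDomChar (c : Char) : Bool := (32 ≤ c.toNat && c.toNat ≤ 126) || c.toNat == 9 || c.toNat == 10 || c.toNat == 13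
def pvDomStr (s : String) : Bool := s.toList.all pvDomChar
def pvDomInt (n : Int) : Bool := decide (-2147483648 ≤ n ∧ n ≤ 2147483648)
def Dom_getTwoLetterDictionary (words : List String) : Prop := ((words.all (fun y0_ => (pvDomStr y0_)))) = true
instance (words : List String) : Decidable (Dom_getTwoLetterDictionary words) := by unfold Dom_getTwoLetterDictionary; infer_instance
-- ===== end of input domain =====

-- B replaces A's dict-based dedup-then-sort with sort-all-prefixes then one adjacent-duplicate-removal pass (alternative decomposition, same result).

-- ===== PORT A =====
def getTwoLetterDictionary (words : List String) : List String :=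
  let d := words.foldl (fun d word =>
    let twoLetters := PySem.Str.slice word (some 0) (some 2)
    let d := if d.contains twoLetters then d else d.insert twoLetters (0 : Int)
    d.modify twoLetters (0 : Int) (· + 1)) PySem.Dict.empty
  PySem.List.sorted d.keys (fun x => x)

-- ===== PORT B =====
-- the body of Source B's for-loop (named so the proofs can speak about one step)
def pvStepB (result : List String) (p : String) : List String :=
  match result.getLast? with
  | none => result ++ [p]
  | some q => if q ≠ p then result ++ [p] else result

def getTwoLetterDictionary_alt (words : List String) : List String :=
  let prefixes := PySem.List.sorted (words.map (fun word => PySem.Str.slice word (some 0) (some 2))) (fun x => x)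
  prefixes.foldl pvStepB []

-- ===== PRECONDITION & SPEC =====
def Spec_getTwoLetterDictionary (words : List String) (out : List String) : Prop := out = getTwoLetterDictionary_alt words
instance (words : List String) (out : List String) : Decidable (Spec_getTwoLetterDictionary words out) := by unfold Spec_getTwoLetterDictionary; infer_instance

-- ===== CLAIM (what is proved, stated in full; the proofs are below) =====
def Claim_equal_getTwoLetterDictionary : Prop := ∀ (words : List String), Dom_getTwoLetterDictionary words → Spec_getTwoLetterDictionary words (getTwoLetterDictionary words)

-- ===== LEMMAS AND PROOFS =====

-- structural form of B's adjacent-dedup loop, for reasoning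
def pvAdjDedup (q : String) : List String → List String
  | [] => []
  | x :: xs => if q ≠ x then x :: pvAdjDedup x xs else pvAdjDedup q xs

lemma pvAdjDedup_cons_ne (q x : String) (xs : List String) (h : q ≠ x) :
    pvAdjDedup q (x :: xs) = x :: pvAdjDedup x xs := by simp [pvAdjDedup, h]

lemma pvAdjDedup_cons_eq (q : String) (xs : List String) :
    pvAdjDedup q (q :: xs) = pvAdjDedup q xs := by simp [pvAdjDedup]

lemma pvStepB_concat (acc : List String) (q p : String) :
    pvStepB (acc ++ [q]) p = if q ≠ p then acc ++ [q] ++ [p] else acc ++ [q] := by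
  have hlast : (acc ++ [q]).getLast? = some q := by simp
  simp [pvStepB, hlast]

lemma pvStepB_nil (p : String) : pvStepB [] p = [p] := by simp [pvStepB]

lemma pvB_loop_eq (xs : List String) : ∀ (acc : List String) (q : String),
    xs.foldl pvStepB (acc ++ [q]) = acc ++ [q] ++ pvAdjDedup q xs := by
  induction xs with
  | nil => intro acc q; simp [pvAdjDedup]
  | cons x xs ih =>
    intro acc q
    rw [List.foldl_cons, pvStepB_concat]
    by_cases h : q = x
    · subst h
      rw [if_neg (by simp), pvAdjDedup_cons_eq]
      exact ih acc q
    · rw [if_pos h, pvAdjDedup_cons_ne q x xs h]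
      have := ih (acc ++ [q]) x
      simpa [List.append_assoc] using this

lemma pvAdjDedup_spec (xs : List String) : ∀ (q : String),
    (q :: xs).Pairwise (· ≤ ·) →
    (q :: pvAdjDedup q xs).Pairwise (· < ·) ∧ ∀ y, y ∈ q :: pvAdjDedup q xs ↔ y ∈ q :: xs := by
  induction xs with
  | nil => intro q _; simp [pvAdjDedup]
  | cons x xs ih =>
    intro q hp
    rcases List.pairwise_cons.mp hp with ⟨hq, hp'⟩
    by_cases h : q = x
    · subst h
      rw [pvAdjDedup_cons_eq]
      have hp2 : (q :: xs).Pairwise (· ≤ ·) :=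
        List.pairwise_cons.mpr ⟨fun y hy => hq y (by simp [hy]), (List.pairwise_cons.mp hp').2⟩
      rcases ih q hp2 with ⟨hpw, hmem⟩
      refine ⟨hpw, fun y => ?_⟩
      rw [hmem y]
      simp only [List.mem_cons]
      tauto
    · have hqx : q < x := lt_of_le_of_ne (hq x (by simp)) h
      rw [pvAdjDedup_cons_ne q x xs h]
      rcases ih x hp' with ⟨hpw, hmem⟩
      constructor
      · refine List.pairwise_cons.mpr ⟨?_, hpw⟩
        intro y hy
        have hy' : y ∈ x :: xs := (hmem y).mp hy
        rcases List.mem_cons.mp hy' with rfl | hin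
        · exact hqx
        · exact lt_of_lt_of_le hqx ((List.pairwise_cons.mp hp').1 y hin)
      · intro y
        constructor
        · intro hy
          rcases List.mem_cons.mp hy with rfl | hy'
          · simp
          · have := (hmem y).mp hy'
            simp [List.mem_cons] at this ⊢
            tauto
        · intro hy
          rcases List.mem_cons.mp hy with rfl | hy'
          · simp
          · have := (hmem y).mpr hy'
            simp [List.mem_cons] at this ⊢
            tauto

lemma pvKeysA (words : List String) : ∀ (d : PySem.Dict String Int), d.keys.Nodup →
    (words.foldl (fun d word =>
      let twoLetters := PySem.Str.slice word (some 0) (some 2)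
      let d := if d.contains twoLetters then d else d.insert twoLetters (0 : Int)
      d.modify twoLetters (0 : Int) (· + 1)) d).keys
    = PySem.Set.update d.keys (words.map (fun word => PySem.Str.slice word (some 0) (some 2))) := by
  induction words with
  | nil => intro d _; simp [PySem.Set.update_nil]
  | cons w ws ih =>
    intro d hnd
    simp only [List.foldl_cons, List.map_cons, PySem.Set.update_cons]
    set t := PySem.Str.slice w (some 0) (some 2) with ht
    by_cases hc : d.contains t = true
    · have hkeys : (d.modify t (0 : Int) (· + 1)).keys = d.keys := by
        rw [PySem.Dict.keys_modify, PySem.Dict.keys_insert_of_contains _ _ hc]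
      have hadd : PySem.Set.add d.keys t = d.keys :=
        PySem.Set.add_of_mem ((PySem.Dict.contains_iff_mem_keys d t).mp hc)
      simp only [hc, ite_true]
      rw [ih _ (by rw [hkeys]; exact hnd), hkeys, hadd]
    · have hc' : d.contains t = false := by simpa using hc
      have hkeys1 : (d.insert t (0 : Int)).keys = d.keys ++ [t] :=
        PySem.Dict.keys_insert_of_not_contains d _ hc'
      have hc2 : (d.insert t (0 : Int)).contains t = true := PySem.Dict.contains_insert_self d t 0
      have hkeys2 : ((d.insert t (0 : Int)).modify t (0 : Int) (· + 1)).keys = d.keys ++ [t] := by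
        rw [PySem.Dict.keys_modify, PySem.Dict.keys_insert_of_contains _ _ hc2, hkeys1]
      have htn : t ∉ d.keys := fun hm => by
        rw [(PySem.Dict.contains_iff_mem_keys d t).mpr hm] at hc'; exact absurd hc' (by simp)
      have hnd2 : (d.keys ++ [t]).Nodup := by
        refine List.nodup_append.mpr ⟨hnd, List.nodup_singleton t, ?_⟩
        intro a ha b hb
        simp only [List.mem_singleton] at hb
        subst hb
        rintro rfl
        exact htn ha
      have hadd : PySem.Set.add d.keys t = d.keys ++ [t] := PySem.Set.add_of_not_mem htn
      simp only [hc', ite_false, Bool.false_eq_true]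
      rw [ih _ (by rw [hkeys2]; exact hnd2), hkeys2, hadd]

-- ===== VERDICT (by name: the statement is the Claim_ definition above) =====
theorem getTwoLetterDictionary_spec : Claim_equal_getTwoLetterDictionary := by
  unfold Claim_equal_getTwoLetterDictionary Spec_getTwoLetterDictionary
  intro words _
  unfold getTwoLetterDictionary getTwoLetterDictionary_alt
  simp only []
  set ps := words.map (fun word => PySem.Str.slice word (some 0) (some 2)) with hps
  have hk := pvKeysA words PySem.Dict.empty (by simp [PySem.Dict.keys_empty])
  rw [hk]
  have hupd : PySem.Set.update (PySem.Dict.empty (κ := String) (ν := Int)).keys ps = PySem.Set.ofList ps := by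
    simp [PySem.Dict.keys_empty, PySem.Set.update_nil_left]
  rw [hupd]
  have hsp : (PySem.List.sorted ps (fun x => x)).Pairwise (· ≤ ·) := by
    simpa using PySem.List.sorted_pairwise ps (fun x => x)
  cases hs : PySem.List.sorted ps (fun x => x) with
  | nil =>
    have hps0 : ps = [] := (PySem.List.sorted_eq_nil_iff ps (fun x => x) false).mp hs
    rw [hps0]
    rfl
  | cons x xs =>
    rw [hs] at hsp
    have hfold : (x :: xs).foldl pvStepB ([] : List String) = x :: pvAdjDedup x xs := by
      rw [List.foldl_cons, pvStepB_nil]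
      simpa using pvB_loop_eq xs [] x
    rw [hfold]
    rcases pvAdjDedup_spec xs x hsp with ⟨hpw, hmem⟩
    have hnd1 : (x :: pvAdjDedup x xs).Nodup :=
      List.Pairwise.imp (fun h => ne_of_lt h) hpw
    have hperm : (x :: pvAdjDedup x xs).Perm (PySem.Set.ofList ps) := by
      rw [List.perm_ext_iff_of_nodup hnd1 (PySem.Set.nodup_ofList ps)]
      intro y
      rw [hmem y, PySem.Set.mem_ofList, ← hs]
      exact PySem.List.mem_sorted ps (fun x => x) false y
    exact PySem.List.sorted_eq_of_perm_of_pairwise_lt _ _ (fun x => x) hperm hpw
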